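-- pv_equiv track=rewrite | github.com/MeluvRose/Solving_Algorithms | 프로그래머스/unrated/160586. 대충 만든 자판/대충 만든 자판.py | solution
-- ===== SOURCE A (Python) =====
-- def solution(keymap, targets):
--     answer = []
--     dictKey = {}
--
--     for key in keymap:
--         for idx, k in enumerate(key):
--             if((k not in dictKey.keys())
--               or idx + 1 < dictKey[k]):
--                 dictKey[k] = idx + 1;
--     for target in targets:
--         count = 0;
--         for c in target:
--             if c not in dictKey.keys():
--                 count = -1;
--                 break;
--             count += dictKey[c];
--         answer.append(count);
--     return answer;
-- ===== SOURCE B (Python) =====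
-- def solution(keymap, targets):
--     answer = []
--     for target in targets:
--         count = 0
--         for c in target:
--             positions = [key.index(c) + 1 for key in keymap if c in key]
--             if not positions:
--                 count = -1
--                 break
--             count += min(positions)
--         answer.append(count)
--     return answer
-- ===== Notes on version B (the rewrite author's own statement) =====
-- stated objective: simpler
-- what changed: Drops the precomputed min-position dictionary; for each target character B scans the keymaps directly, taking the min of key.index(c)+1 over the keymaps containing c (-1 on absence).
import Mathlib
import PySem

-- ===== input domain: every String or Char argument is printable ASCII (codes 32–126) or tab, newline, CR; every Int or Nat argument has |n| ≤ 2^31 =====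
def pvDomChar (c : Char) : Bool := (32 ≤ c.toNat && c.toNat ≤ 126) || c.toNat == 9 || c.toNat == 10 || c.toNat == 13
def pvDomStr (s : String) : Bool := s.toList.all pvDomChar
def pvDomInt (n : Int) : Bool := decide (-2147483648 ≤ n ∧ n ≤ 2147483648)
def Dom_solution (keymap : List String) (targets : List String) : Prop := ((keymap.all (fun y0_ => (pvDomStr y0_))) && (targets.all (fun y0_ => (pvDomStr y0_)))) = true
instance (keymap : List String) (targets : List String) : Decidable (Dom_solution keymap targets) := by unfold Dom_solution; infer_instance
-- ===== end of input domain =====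

-- B drops A's precomputed min-position dictionary and scans the keymaps per target character (simpler; not faster).

-- ===== PORT A =====
-- the dict-building double loop of A
def solBuildDict (keymap : List String) : PySem.Dict Char Int :=
  keymap.foldl (fun d key =>
    (PySem.List.enumerate key.toList).foldl (fun d p =>
      match d.get? p.2 with
      | none => d.insert p.2 (p.1 + 1)
      | some v => if p.1 + 1 < v then d.insert p.2 (p.1 + 1) else d) d)
    PySem.Dict.empty

-- A's inner target loop with its break (-1)
def solCountA (d : PySem.Dict Char Int) : List Char → Int → Int
  | [], count => count
  | c :: rest, count =>
    match d.get? c with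
    | none => -1
    | some v => solCountA d rest (count + v)

def solution (keymap : List String) (targets : List String) : List Int :=
  let dictKey := solBuildDict keymap
  targets.foldl (fun answer target => answer ++ [solCountA dictKey target.toList 0]) []

-- ===== PORT B =====
-- [key.index(c) + 1 for key in keymap if c in key]; index? is some on the filtered keys, so getD 0 is exact
def solPositions (keymap : List String) (c : Char) : List Int :=
  (keymap.filter (fun key => key.toList.contains c)).map
    (fun key => ((PySem.List.index? key.toList c).getD 0 : Int) + 1)

-- B's inner target loop with its break (-1)
def solCountB (keymap : List String) : List Char → Int → Int
  | [], count => count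
  | c :: rest, count =>
    let positions := solPositions keymap c
    match PySem.List.min? positions (fun x => x) with
    | none => -1
    | some m => solCountB keymap rest (count + m)

def solution_alt (keymap : List String) (targets : List String) : List Int :=
  targets.foldl (fun answer target => answer ++ [solCountB keymap target.toList 0]) []

-- ===== PRECONDITION & SPEC =====
def Spec_solution (keymap : List String) (targets : List String) (out : List Int) : Prop := out = solution_alt keymap targets
instance (keymap : List String) (targets : List String) (out : List Int) : Decidable (Spec_solution keymap targets out) := by unfold Spec_solution; infer_instance

-- ===== CLAIM (what is proved, stated in full; the proofs are below) =====
def Claim_equal_solution : Prop := ∀ (keymap : List String) (targets : List String), Dom_solution keymap targets → Spec_solution keymap targets (solution keymap targets)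

-- ===== LEMMAS AND PROOFS =====

-- min of two optional values (none = absent)
def solOptMin : Option Int → Option Int → Option Int
  | none, b => b
  | some v, none => some v
  | some v, some w => some (min v w)

theorem solOptMin_none_left (b : Option Int) : solOptMin none b = b := by cases b <;> rfl

theorem solOptMin_some_none (v : Int) : solOptMin (some v) none = some v := rfl

theorem solOptMin_some_some (v w : Int) : solOptMin (some v) (some w) = some (min v w) := rfl

-- first occurrence of c in key, one-based, as an Option
def solOcc (key : List Char) (c : Char) : Option Int :=
  (PySem.List.index? key c).map (fun i : Nat => (i : Int) + 1)

theorem solOptMin_assoc (a b c : Option Int) :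
    solOptMin (solOptMin a b) c = solOptMin a (solOptMin b c) := by
  cases a <;> cases b <;> cases c <;> simp [solOptMin, min_assoc]

theorem foldl_min_comm (t : List Int) (v x : Int) :
    t.foldl min (min v x) = min v (t.foldl min x) := by
  induction t generalizing x with
  | nil => rfl
  | cons y t ih => simpa [List.foldl, min_assoc] using ih (min x y)

-- B's per-character min equals the optMin fold over the keymaps
theorem min?_solPositions (keymap : List String) (c : Char) :
    PySem.List.min? (solPositions keymap c) (fun x => x) =
      keymap.foldr (fun key acc => solOptMin (solOcc key.toList c) acc) none := by
  induction keymap with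
  | nil => rfl
  | cons key rest ih =>
    cases hi : PySem.List.index? key.toList c with
    | none =>
      have h : c ∉ key.toList := (PySem.List.index?_eq_none_iff key.toList c).mp hi
      have hi' : List.idxOf? c key.toList = none := by
        rw [← PySem.List.index?_eq_idxOf?]; exact hi
      have hocc : solOcc key.toList c = none := by simp [solOcc, hi']
      have hfil : solPositions (key :: rest) c = solPositions rest c := by
        simp [solPositions, List.filter, h]
      rw [hfil, ih, List.foldr, hocc, solOptMin_none_left]
    | some i =>
      have h : c ∈ key.toList := by
        rw [← PySem.List.index?_isSome_iff (xs := key.toList) (v := c), hi]; rfl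
      have hi' : List.idxOf? c key.toList = some i := by
        rw [← PySem.List.index?_eq_idxOf?]; exact hi
      have hocc : solOcc key.toList c = some ((i : Int) + 1) := by simp [solOcc, hi']
      have hfil : solPositions (key :: rest) c = ((i : Int) + 1) :: solPositions rest c := by
        simp [solPositions, List.filter, h, hi']
      rw [hfil, PySem.List.min?_id_cons, List.foldr, hocc, ← ih]
      cases hl : solPositions rest c with
      | nil => rfl
      | cons x t =>
        rw [PySem.List.min?_id_cons, solOptMin_some_some, List.foldl_cons, foldl_min_comm]

-- the inner enumerate fold: its effect on any key's entry
theorem inner_fold_get? (xs : List Char) (s : Int) (d : PySem.Dict Char Int) (c : Char) :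
    ((PySem.List.enumerate xs s).foldl (fun d p =>
      match d.get? p.2 with
      | none => d.insert p.2 (p.1 + 1)
      | some v => if p.1 + 1 < v then d.insert p.2 (p.1 + 1) else d) d).get? c =
    solOptMin (d.get? c)
      ((PySem.List.index? xs c).map (fun i : Nat => s + (i : Int) + 1)) := by
  induction xs generalizing s d with
  | nil =>
    simp only [PySem.List.enumerate_nil, List.foldl_nil, PySem.List.index?, List.idxOf?,
      List.findIdx?]
    cases d.get? c <;> rfl
  | cons x xs ih =>
    rw [PySem.List.enumerate_cons, List.foldl]
    by_cases hx : x = c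
    · subst hx
      -- after the step, entry x holds some m with m ≤ s + 1
      obtain ⟨m, hm, hle, hmin⟩ :
          ∃ m, (match d.get? x with
            | none => d.insert x (s + 1)
            | some v => if s + 1 < v then d.insert x (s + 1) else d).get? x = some m ∧
            m ≤ s + 1 ∧ some m = solOptMin (d.get? x) (some (s + 1)) := by
        cases hv : d.get? x with
        | none =>
          refine ⟨s + 1, ?_, le_refl _, (solOptMin_none_left _).symm⟩
          simp [PySem.Dict.get?_insert_self]
        | some v =>
          by_cases hlt : s + 1 < v
          · refine ⟨s + 1, ?_, le_refl _, ?_⟩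
            · simp [hlt, PySem.Dict.get?_insert_self]
            · rw [solOptMin_some_some, min_eq_right (le_of_lt hlt)]
          · refine ⟨v, ?_, by omega, ?_⟩
            · simp [hv, hlt]
            · rw [solOptMin_some_some, min_eq_left (by omega : v ≤ s + 1)]
      rw [ih, hm, PySem.List.index?_cons_self]
      have hz : ((some (0 : Nat)).map (fun i : Nat => s + (i : Int) + 1)) = some (s + 1) := by
        simp
      rw [hz, ← hmin]
      cases hrest : PySem.List.index? xs x with
      | none => rw [Option.map_none, solOptMin_some_none]
      | some j =>
        rw [Option.map_some, solOptMin_some_some]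
        have hj : (0:Int) ≤ (j:Int) := Int.natCast_nonneg j
        rw [min_eq_left (by omega : m ≤ s + 1 + (j : Int) + 1)]
    · have hne : c ≠ x := fun h => hx h.symm
      have hget :
          (match d.get? x with
            | none => d.insert x (s + 1)
            | some v => if s + 1 < v then d.insert x (s + 1) else d).get? c = d.get? c := by
        cases d.get? x with
        | none => exact PySem.Dict.get?_insert_of_ne d _ hne
        | some v =>
          by_cases hlt : s + 1 < v
          · simp only [hlt, if_true]
            exact PySem.Dict.get?_insert_of_ne d _ hne
          · simp [hlt]
      rw [ih, hget, PySem.List.index?_cons_of_ne _ hx]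
      cases PySem.List.index? xs c with
      | none => rfl
      | some j =>
        simp only [Option.map_some]
        congr 2
        push_cast
        ring

-- the whole dict build: each entry is the running optMin over the keymaps
theorem solBuildDict_get?_aux (keymap : List String) (d : PySem.Dict Char Int) (c : Char) :
    (keymap.foldl (fun d key =>
      (PySem.List.enumerate key.toList).foldl (fun d p =>
        match d.get? p.2 with
        | none => d.insert p.2 (p.1 + 1)
        | some v => if p.1 + 1 < v then d.insert p.2 (p.1 + 1) else d) d) d).get? c =
    solOptMin (d.get? c)
      (keymap.foldr (fun key acc => solOptMin (solOcc key.toList c) acc) none) := by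
  induction keymap generalizing d with
  | nil => rw [List.foldl_nil, List.foldr_nil]; cases d.get? c <;> rfl
  | cons key rest ih =>
    rw [List.foldl, ih, List.foldr, ← solOptMin_assoc]
    congr 1
    rw [inner_fold_get? key.toList 0 d c]
    congr 1
    simp [solOcc]

theorem solBuildDict_get? (keymap : List String) (c : Char) :
    (solBuildDict keymap).get? c = PySem.List.min? (solPositions keymap c) (fun x => x) := by
  rw [solBuildDict, solBuildDict_get?_aux, min?_solPositions]
  rw [PySem.Dict.get?_empty, solOptMin_none_left]

theorem count_eq (keymap : List String) (chars : List Char) (count : Int) :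
    solCountA (solBuildDict keymap) chars count = solCountB keymap chars count := by
  induction chars generalizing count with
  | nil => rfl
  | cons c rest ih =>
    rw [solCountA, solCountB, solBuildDict_get? keymap c]
    cases PySem.List.min? (solPositions keymap c) (fun x => x) with
    | none => rfl
    | some m => exact ih _

-- ===== VERDICT (by name: the statement is the Claim_ definition above) =====
theorem solution_spec : Claim_equal_solution := by
  intro keymap targets _
  unfold Spec_solution solution solution_alt
  induction targets using List.reverseRecOn with
  | nil => rfl
  | append_singleton ts t ih => simp [List.foldl_append, count_eq]
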